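-- pv_equiv track=rewrite | github.com/hakuna-max/ref-format | main.py | parse_ris
-- ===== SOURCE A (Python) =====
-- def parse_ris(ris_text):
--     entries = ris_text.split("ER  -")
--     parsed_entries = []
--
--     for entry in entries:
--         lines = entry.strip().split("\n")
--         parsed_entry = {}
--         for line in lines:
--             if "  - " not in line:
--                 continue
--             key, value = line.split("  - ", 1)
--             if key in parsed_entry:
--                 parsed_entry[key].append(value)
--             else:
--                 parsed_entry[key] = [value]
--
--         parsed_entries.append(parsed_entry)
--
--     return parsed_entries
-- ===== SOURCE B (Python) =====
-- def parse_ris(ris_text):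
--     parsed_entries = []
--     for chunk in ris_text.split("ER  -"):
--         pairs = [line.split("  - ", 1) for line in chunk.strip().split("\n")
--                  if "  - " in line]
--         parsed_entries.append({k: [v for kk, v in pairs if kk == k]
--                                for k, _ in pairs})
--     return parsed_entries
-- ===== Notes on version B (the rewrite author's own statement) =====
-- stated objective: alternative
-- what changed: The inner per-line loop that builds each entry's dict incrementally (membership test, then append-or-insert) is replaced by collecting the (key, value) pairs of the chunk first and then grouping them with a single dict comprehension whose values are comprehensions over the pair list.
import Mathlib
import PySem

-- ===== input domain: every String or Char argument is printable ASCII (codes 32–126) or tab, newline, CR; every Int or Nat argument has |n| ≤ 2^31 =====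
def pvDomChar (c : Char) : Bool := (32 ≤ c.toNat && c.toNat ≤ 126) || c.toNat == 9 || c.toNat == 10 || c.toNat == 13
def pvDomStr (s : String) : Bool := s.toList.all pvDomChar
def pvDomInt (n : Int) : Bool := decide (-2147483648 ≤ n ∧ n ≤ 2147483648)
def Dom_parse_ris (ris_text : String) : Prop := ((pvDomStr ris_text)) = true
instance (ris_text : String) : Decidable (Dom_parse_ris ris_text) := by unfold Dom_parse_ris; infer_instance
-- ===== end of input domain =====

-- B replaces A's incremental dict building (membership test + append/insert per line) by
-- collecting the (key, value) pairs of a chunk first and then grouping them with a dict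
-- comprehension; objective: alternative (same result, a two-phase group-by instead of a
-- one-pass accumulator; not claimed faster).


-- ===== PORT A =====
-- literal port of A: split on "ER  -", then per entry a line loop that updates the
-- dict in place (append to the existing list, or insert a fresh singleton)
def parse_ris (ris_text : String) : List (List (String × List String)) :=
  let entries := (PySem.Str.split? ris_text "ER  -").getD []
  (entries.foldl (fun acc entry =>
    let lines := (PySem.Str.split? (PySem.Str.strip entry) "\n").getD []
    let parsed_entry := lines.foldl (fun pe line =>
      if PySem.Str.isIn "  - " line = false then pe
      else
        match PySem.Str.splitMax? line "  - " 1 with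
        | some [key, value] =>
            if pe.contains key then pe.insert key (pe.getD key [] ++ [value])
            else pe.insert key [value]
        | _ => pe) PySem.Dict.empty
    acc ++ [parsed_entry.items]) [])

-- ===== PORT B =====
-- port of B: per chunk, first the list of (key, value) pairs, then the dict
-- comprehension {k : [v for kk, v in pairs if kk == k] for k, _ in pairs}
def parse_ris_alt (ris_text : String) : List (List (String × List String)) :=
  ((PySem.Str.split? ris_text "ER  -").getD []).map (fun chunk =>
    let pairs := ((PySem.Str.split? (PySem.Str.strip chunk) "\n").getD []).filterMap (fun line =>
      if PySem.Str.isIn "  - " line then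
        (PySem.Str.splitMax? line "  - " 1).bind (fun parts =>
          if parts.length = 2 then some (parts[0]!, parts[1]!) else none)
      else none)
    (pairs.foldl (fun d p =>
        d.insert p.1 ((pairs.filter (fun q => q.1 == p.1)).map (·.2)))
      PySem.Dict.empty).items)

-- ===== PRECONDITION & SPEC =====
def Spec_parse_ris (ris_text : String) (out : List (List (String × List String))) : Prop := out = parse_ris_alt ris_text
instance (ris_text : String) (out : List (List (String × List String))) : Decidable (Spec_parse_ris ris_text out) := by unfold Spec_parse_ris; infer_instance

-- ===== CLAIM (what is proved, stated in full; the proofs are below) =====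
def Claim_equal_parse_ris : Prop := ∀ (ris_text : String), Dom_parse_ris ris_text → Spec_parse_ris ris_text (parse_ris ris_text)

-- ===== LEMMAS AND PROOFS =====

-- accumulating with `acc ++ [f x]` is `map`
theorem foldl_append_singleton {α β : Type} (f : α → β) (l : List α) (acc : List β) :
    l.foldl (fun a x => a ++ [f x]) acc = acc ++ l.map f := by
  induction l generalizing acc with
  | nil => simp
  | cons x xs ih => simp [List.foldl, ih]

-- a fold that skips `none`s of an extractor is a fold over the filterMap
theorem foldl_filterMap {α β γ : Type} (f : α → Option β) (g : γ → β → γ) (l : List α) (init : γ) :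
    (l.filterMap f).foldl g init
      = l.foldl (fun d x => match f x with | some p => g d p | none => d) init := by
  induction l generalizing init with
  | nil => rfl
  | cons x xs ih =>
    cases h : f x <;> simp [h, List.foldl, ih]

-- two folds with pointwise-equal step functions agree
theorem foldl_fun_congr {α γ : Type} {f g : γ → α → γ} {l : List α} {init : γ}
    (h : ∀ d x, f d x = g d x) : l.foldl f init = l.foldl g init := by
  induction l generalizing init with
  | nil => rfl
  | cons x xs ih => simp only [List.foldl, h, ih]

-- A's branch (append to existing list / insert singleton) IS `modify key [] (· ++ [v])`
theorem branch_eq_modify (pe : PySem.Dict String (List String)) (k : String) (v : String) :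
    (if pe.contains k then pe.insert k (pe.getD k [] ++ [v]) else pe.insert k [v])
      = pe.modify k [] (· ++ [v]) := by
  by_cases h : pe.contains k = true
  · simp [h, PySem.Dict.modify]
  · simp only [Bool.not_eq_true] at h
    simp [h, PySem.Dict.modify, PySem.Dict.getD_of_not_contains _ _ h]

-- a fold of inserts whose value depends only on the key: the final lookup
theorem getD_foldl_insert_keyfun (v : String → List String)
    (l : List (String × String)) (d : PySem.Dict String (List String)) (c : String) :
    ((l.foldl (fun d p => d.insert p.1 (v p.1)) d).getD c [])
      = if c ∈ l.map Prod.fst then v c else d.getD c [] := by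
  induction l generalizing d with
  | nil => simp
  | cons p ps ih =>
    simp only [List.foldl, List.map_cons, List.mem_cons]
    rw [ih]
    by_cases hc : c ∈ ps.map Prod.fst
    · simp [hc]
    · by_cases he : c = p.1
      · simp [he, PySem.Dict.getD_insert_self]
      · simp [hc, he, PySem.Dict.getD_insert_of_ne _ _ _ he]

-- the per-chunk dicts of A and B have the same items list
theorem chunk_items_eq (pairs : List (String × String)) :
    (pairs.foldl (fun pe p => pe.modify p.1 [] (· ++ [p.2])) PySem.Dict.empty).items
      = (pairs.foldl (fun d p =>
            d.insert p.1 ((pairs.filter (fun q => q.1 == p.1)).map (·.2)))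
          PySem.Dict.empty).items := by
  have hkA : (pairs.foldl (fun pe p => pe.modify p.1 [] (· ++ [p.2])) PySem.Dict.empty).keys
      = PySem.Set.ofList (pairs.map Prod.fst) := by
    rw [PySem.Dict.keys_foldl_modify_key]
    simp [PySem.Set.update, PySem.Set.ofList_eq_foldl, PySem.Dict.keys_empty]
  have hkB : (pairs.foldl (fun d p =>
        d.insert p.1 ((pairs.filter (fun q => q.1 == p.1)).map (·.2))) PySem.Dict.empty).keys
      = PySem.Set.ofList (pairs.map Prod.fst) := by
    rw [PySem.Dict.keys_foldl_insert_key]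
    simp [PySem.Set.update, PySem.Set.ofList_eq_foldl, PySem.Dict.keys_empty]
  have hndA : (pairs.foldl (fun pe p => pe.modify p.1 [] (· ++ [p.2])) PySem.Dict.empty).keys.Nodup := by
    rw [hkA]; exact PySem.Set.nodup_ofList _
  have hndB : (pairs.foldl (fun d p =>
        d.insert p.1 ((pairs.filter (fun q => q.1 == p.1)).map (·.2))) PySem.Dict.empty).keys.Nodup := by
    rw [hkB]; exact PySem.Set.nodup_ofList _
  rw [PySem.Dict.items_eq_map_keys _ hndA [], PySem.Dict.items_eq_map_keys _ hndB [],
      hkA, hkB]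
  apply List.map_congr_left
  intro k hk
  have hkmem : k ∈ pairs.map Prod.fst := (PySem.Set.mem_ofList _ _).mp hk
  have hA : (pairs.foldl (fun pe p => pe.modify p.1 [] (· ++ [p.2])) PySem.Dict.empty).getD k []
      = (pairs.filter (fun q => q.1 == k)).map (·.2) := by
    rw [PySem.Dict.getD_foldl_modify_append]
    simp
  have hB : (pairs.foldl (fun d p =>
        d.insert p.1 ((pairs.filter (fun q => q.1 == p.1)).map (·.2))) PySem.Dict.empty).getD k []
      = (pairs.filter (fun q => q.1 == k)).map (·.2) := by
    rw [getD_foldl_insert_keyfun (fun c => (pairs.filter (fun q => q.1 == c)).map (·.2))]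
    simp [hkmem]
  rw [hA, hB]

-- ===== VERDICT (by name: the statement is the Claim_ definition above) =====
theorem parse_ris_spec : Claim_equal_parse_ris := by
  intro ris_text _
  unfold Spec_parse_ris parse_ris parse_ris_alt
  rw [foldl_append_singleton]
  simp only [List.nil_append]
  apply List.map_congr_left
  intro entry _
  set extract : String → Option (String × String) := fun line =>
    if PySem.Str.isIn "  - " line then
      (PySem.Str.splitMax? line "  - " 1).bind (fun parts =>
        if parts.length = 2 then some (parts[0]!, parts[1]!) else none)
    else none with hextract
  have hfold : ∀ (lines : List String),
      lines.foldl (fun pe line =>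
        if PySem.Str.isIn "  - " line = false then pe
        else
          match PySem.Str.splitMax? line "  - " 1 with
          | some [key, value] =>
              if pe.contains key then pe.insert key (pe.getD key [] ++ [value])
              else pe.insert key [value]
          | _ => pe) PySem.Dict.empty
      = (lines.filterMap extract).foldl
          (fun pe p => pe.modify p.1 [] (· ++ [p.2])) PySem.Dict.empty := by
    intro lines
    rw [foldl_filterMap]
    apply foldl_fun_congr
    intro pe line
    simp only [PySem.Str.isIn_eq]
    by_cases h0 : PySem.Chars.isIn ("  - ".toList) line.toList = true
    all_goals have h : PySem.Chars.isIn [' ', ' ', '-', ' '] line.toList = (PySem.Chars.isIn ("  - ".toList) line.toList) := rfl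
    · rw [h0] at h
      simp only [hextract]
      cases hs : PySem.Str.splitMax? line "  - " 1 with
      | none => simp [h]
      | some l =>
        match l with
        | [] => simp [h]
        | [a] => simp [h]
        | [a, b] => simp [h, branch_eq_modify]
        | a :: b :: c :: t => simp [h]
    · simp only [Bool.not_eq_true] at h0
      rw [h0] at h
      simp [hextract, h]
  rw [hfold]
  exact chunk_items_eq _
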